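-- pv_equiv track=rewrite | github.com/shoeb-saquib/emotion-classifier | src/clustering/save_goalex_clusters.py | text_to_cluster_id
-- ===== SOURCE A (Python) =====
-- def _normalize_text(s: str) -> str:
--     return (s or "").strip()
--
-- def text_to_cluster_id(cluster_result: dict) -> dict:
--     """
--     Build mapping from normalized text to cluster_id (0, 1, 2, ...).
--     Order follows iteration over cluster_result keys.
--     """
--     text_to_id = {}
--     for cluster_id, (description, texts) in enumerate(cluster_result.items()):
--         for t in texts:
--             key = _normalize_text(t)
--             if key not in text_to_id:  # first cluster wins if text appears in multiple
--                 text_to_id[key] = cluster_id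
--     return text_to_id
-- ===== SOURCE B (Python) =====
-- def text_to_cluster_id(cluster_result: dict) -> dict:
--     """Group-then-reduce: collect every cluster id each normalized text
--     appears in (one forward pass), then take the minimum id per text."""
--     groups = {}
--     for cluster_id, (description, texts) in enumerate(cluster_result.items()):
--         for t in texts:
--             key = (t or "").strip()
--             groups[key] = groups.get(key, []) + [cluster_id]
--     return {k: min(ids) for k, ids in groups.items()}
-- ===== Notes on version B (the rewrite author's own statement) =====
-- stated objective: alternative
-- what changed: A maintains the answer dict directly with a 'first cluster wins' membership test on each text; B instead groups every cluster id each normalized text appears in during one forward pass and then reduces each group with min, which equals the first-seen id because cluster ids increase.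
import Mathlib
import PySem

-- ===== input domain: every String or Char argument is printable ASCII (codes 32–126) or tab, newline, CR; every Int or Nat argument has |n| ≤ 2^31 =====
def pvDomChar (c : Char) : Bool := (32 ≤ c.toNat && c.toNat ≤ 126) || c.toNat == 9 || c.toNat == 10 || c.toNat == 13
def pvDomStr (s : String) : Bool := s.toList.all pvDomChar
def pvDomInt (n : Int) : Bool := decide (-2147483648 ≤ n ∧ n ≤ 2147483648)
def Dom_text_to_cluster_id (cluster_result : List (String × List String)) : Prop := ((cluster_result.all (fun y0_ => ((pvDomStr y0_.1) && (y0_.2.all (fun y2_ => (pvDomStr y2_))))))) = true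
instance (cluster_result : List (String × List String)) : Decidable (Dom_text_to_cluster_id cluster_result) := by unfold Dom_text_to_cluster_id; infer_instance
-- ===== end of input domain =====

-- B replaces A's "first cluster wins" membership test by a group-then-reduce pass
-- (collect all cluster ids per normalized text, then take the minimum id); same values, alternative decomposition.

-- ===== PORT A =====
-- _normalize_text(s) = (s or "").strip(); "" strips to "", so this is exactly strip
def normalizeText (s : String) : String := PySem.Str.strip s

def text_to_cluster_id (cluster_result : List (String × List String)) : List (String × Int) :=
  ((PySem.List.enumerate cluster_result 0).foldl
    (fun d p =>
      p.2.2.foldl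
        (fun d t =>
          let key := normalizeText t
          if d.contains key then d else d.insert key p.1) d)
    PySem.Dict.empty).items

-- ===== PORT B =====
def text_to_cluster_id_alt (cluster_result : List (String × List String)) : List (String × Int) :=
  let groups :=
    (PySem.List.enumerate cluster_result 0).foldl
      (fun g p =>
        p.2.2.foldl
          (fun g t =>
            let key := PySem.Str.strip t
            g.insert key (g.getD key [] ++ [p.1])) g)
      PySem.Dict.empty
  -- min(ids): ids is always nonempty, min? never returns none (0 is a dead default)
  groups.items.map (fun kv =>
    (kv.1, match PySem.List.min? kv.2 (fun x => x) with | some m => m | none => 0))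

-- ===== PRECONDITION & SPEC =====
def Spec_text_to_cluster_id (cluster_result : List (String × List String)) (out : List (String × Int)) : Prop := out = text_to_cluster_id_alt cluster_result
instance (cluster_result : List (String × List String)) (out : List (String × Int)) : Decidable (Spec_text_to_cluster_id cluster_result out) := by unfold Spec_text_to_cluster_id; infer_instance

-- ===== CLAIM (what is proved, stated in full; the proofs are below) =====
def Claim_equal_text_to_cluster_id : Prop := ∀ (cluster_result : List (String × List String)), Dom_text_to_cluster_id cluster_result → Spec_text_to_cluster_id cluster_result (text_to_cluster_id cluster_result)

-- ===== LEMMAS AND PROOFS =====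

/-- Invariant tying A's dict `d` to B's groups dict `g`: keys of `g` are distinct,
`d` holds the head of each group list, each group list is nonempty, its head is
its minimum, and every id in it is at most `bnd`. -/
def relAB (g : PySem.Dict String (List Int)) (d : PySem.Dict String Int) (bnd : Int) : Prop :=
  g.keys.Nodup ∧
  d.items = g.items.map (fun kv => (kv.1, kv.2.headI)) ∧
  ∀ kv ∈ g.items, kv.2 ≠ [] ∧ ∀ x ∈ kv.2, kv.2.headI ≤ x ∧ x ≤ bnd

theorem relAB_mono {g : PySem.Dict String (List Int)} {d : PySem.Dict String Int}
    {b b' : Int} (h : relAB g d b) (hb : b ≤ b') : relAB g d b' := by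
  refine ⟨h.1, h.2.1, fun kv hkv => ?_⟩
  obtain ⟨hne, hx⟩ := h.2.2 kv hkv
  exact ⟨hne, fun x hxm => ⟨(hx x hxm).1, le_trans (hx x hxm).2 hb⟩⟩

theorem min?_of_headI_min (v : List Int) (hne : v ≠ []) (hm : ∀ x ∈ v, v.headI ≤ x) :
    PySem.List.min? v (fun x => x) = some v.headI := by
  obtain ⟨a, t, rfl⟩ := List.exists_cons_of_ne_nil hne
  rw [PySem.List.min?_id_cons]
  have h1 := PySem.List.foldl_min_le t a
  have h2 := PySem.List.foldl_min_mem t a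
  simp only [List.headI_cons]
  congr 1
  rcases h2 with h2 | h2
  · exact h2
  · exact le_antisymm h1.1 (hm _ (List.mem_cons_of_mem _ h2))

theorem relAB_keys_eq {g : PySem.Dict String (List Int)} {d : PySem.Dict String Int}
    {b : Int} (h : relAB g d b) : d.keys = g.keys := by
  simp only [PySem.Dict.keys, h.2.1, List.map_map]
  rfl

theorem relAB_step (i : Int) (k : String) (g : PySem.Dict String (List Int))
    (d : PySem.Dict String Int) (h : relAB g d i) :
    relAB (g.insert k (g.getD k [] ++ [i]))
      (if d.contains k then d else d.insert k i) i := by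
  obtain ⟨hnd, hit, hpr⟩ := h
  have hkeys : d.contains k = g.contains k := by
    rw [PySem.Dict.contains_eq_decide_mem_keys, PySem.Dict.contains_eq_decide_mem_keys,
      relAB_keys_eq ⟨hnd, hit, hpr⟩]
  by_cases hc : g.contains k = true
  · -- key already present: d unchanged, k's list gets i appended
    rw [hkeys, hc, if_pos rfl]
    have hg : ∃ v0, g.get? k = some v0 := by
      rw [PySem.Dict.contains_eq_isSome_get?] at hc
      exact Option.isSome_iff_exists.mp hc
    obtain ⟨v0, hv0⟩ := hg
    have hvmem : (k, v0) ∈ g.items := PySem.Dict.mem_items_of_get?_eq_some g hv0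
    have hgetD : g.getD k [] = v0 := PySem.Dict.getD_of_get?_eq_some g [] hv0
    obtain ⟨hv0ne, hv0pr⟩ := hpr (k, v0) hvmem
    obtain ⟨a, t, rfl⟩ := List.exists_cons_of_ne_nil hv0ne
    rw [hgetD]
    refine ⟨PySem.Dict.nodup_keys_insert _ _ _ hnd, ?_, ?_⟩
    · rw [hit, PySem.Dict.items_insert_of_contains _ _ hc, List.map_map]
      refine (List.map_congr_left fun p hp => ?_).symm
      by_cases hpk : p.1 = k
      · have : g.get? p.1 = some p.2 := PySem.Dict.get?_of_mem_items g hp hnd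
        rw [hpk, hv0] at this
        have hp2 : p.2 = a :: t := by injection this with h; exact h.symm
        simp [Function.comp, hpk, hp2]
      · simp [Function.comp, hpk]
    · intro kv hkv
      rcases (PySem.Dict.mem_items_insert _ _ _ _).mp hkv with rfl | ⟨hmem, _⟩
      · refine ⟨by simp, fun x hx => ?_⟩
        simp only [List.cons_append, List.headI_cons, List.mem_cons, List.mem_append,
          List.not_mem_nil, or_false] at hx ⊢
        rcases hx with rfl | hx' | rfl
        · exact ⟨le_refl _, (hv0pr x (by simp)).2⟩
        · exact hv0pr x (by simp [hx'])
        · exact ⟨(hv0pr a (by simp)).2, le_refl _⟩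
      · exact hpr kv hmem
  · -- fresh key: both dicts append an entry for k
    have hc' : g.contains k = false := by simpa using hc
    rw [hkeys, hc', if_neg (by simp)]
    have hgetD : g.getD k [] = [] := PySem.Dict.getD_of_not_contains g [] hc'
    rw [hgetD, List.nil_append]
    refine ⟨PySem.Dict.nodup_keys_insert _ _ _ hnd, ?_, ?_⟩
    · rw [PySem.Dict.items_insert_of_not_contains _ _ (by rw [hkeys]; exact hc'),
        PySem.Dict.items_insert_of_not_contains _ _ hc', List.map_append, hit]
      rfl
    · intro kv hkv
      rcases (PySem.Dict.mem_items_insert _ _ _ _).mp hkv with rfl | ⟨hmem, _⟩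
      · exact ⟨by simp, fun x hx => by simp_all⟩
      · exact hpr kv hmem

theorem relAB_inner (i : Int) (ts : List String) (g : PySem.Dict String (List Int))
    (d : PySem.Dict String Int) (h : relAB g d i) :
    relAB
      (ts.foldl (fun g t =>
        g.insert (PySem.Str.strip t) (g.getD (PySem.Str.strip t) [] ++ [i])) g)
      (ts.foldl (fun d t =>
        if d.contains (normalizeText t) then d else d.insert (normalizeText t) i) d) i := by
  induction ts generalizing g d with
  | nil => exact h
  | cons t ts ih =>
    simp only [List.foldl_cons]
    exact ih _ _ (relAB_step i (PySem.Str.strip t) g d h)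

theorem relAB_outer (cr : List (String × List String)) (s : Int)
    (g : PySem.Dict String (List Int)) (d : PySem.Dict String Int) (h : relAB g d s) :
    relAB
      ((PySem.List.enumerate cr s).foldl
        (fun g p =>
          p.2.2.foldl
            (fun g t =>
              g.insert (PySem.Str.strip t) (g.getD (PySem.Str.strip t) [] ++ [p.1])) g) g)
      ((PySem.List.enumerate cr s).foldl
        (fun d p =>
          p.2.2.foldl
            (fun d t =>
              if d.contains (normalizeText t) then d else d.insert (normalizeText t) p.1) d) d)
      (s + cr.length) := by
  induction cr generalizing s g d with
  | nil => simpa [PySem.List.enumerate_nil] using h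
  | cons c cr ih =>
    rw [PySem.List.enumerate_cons]
    have h1 := relAB_inner s c.2 g d h
    have h2 := ih (s + 1) _ _ (relAB_mono h1 (by omega))
    have hb : s + ((c :: cr).length : Int) = s + 1 + (cr.length : Int) := by
      simp only [List.length_cons]; push_cast; ring
    rw [hb]
    exact h2

-- ===== VERDICT (by name: the statement is the Claim_ definition above) =====
theorem text_to_cluster_id_spec : Claim_equal_text_to_cluster_id := by
  intro cr _
  unfold Spec_text_to_cluster_id text_to_cluster_id text_to_cluster_id_alt
  have h := relAB_outer cr 0 PySem.Dict.empty PySem.Dict.empty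
    ⟨by simp [PySem.Dict.empty, PySem.Dict.keys],
     by simp [PySem.Dict.empty],
     by simp [PySem.Dict.empty]⟩
  obtain ⟨_, hit, hpr⟩ := h
  rw [hit]
  refine List.map_congr_left fun kv hkv => ?_
  obtain ⟨hne, hx⟩ := hpr kv hkv
  rw [min?_of_headI_min kv.2 hne (fun x hx' => (hx x hx').1)]
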